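-- pv_equiv track=rewrite | github.com/GiordanDelaCruz/Leet-Code | Easy/Keep Multiplying Found Values by Two/solution.py | findFinalValue
-- ===== SOURCE A (Python) =====
-- def findFinalValue(nums, original):
--     # Create a map of the valyes
--     numsHash = {}
--     for idx, elem in enumerate(nums):
--         if elem not in numsHash:
--             numsHash[elem] = 1
--         else:
--             numsHash[elem] += 1
--
--     # Calculate the original value
--     isCalculationComplete = False
--     while not isCalculationComplete:
--         if original in numsHash:
--             original *= 2
--         else:
--             isCalculationComplete = True
--
--     return original
-- ===== SOURCE B (Python) =====
-- def findFinalValue(nums, original):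
--     # Collect the set of exponents e with original * 2**e present in nums,
--     # then return original * 2**mex(exponents).
--     if original == 0:
--         return original
--     exps = set()
--     for x in nums:
--         if x % original == 0:
--             q = x // original
--             if q > 0 and q == 1 << (q.bit_length() - 1):
--                 exps.add(q.bit_length() - 1)
--     m = 0
--     while m in exps:
--         m += 1
--     return original * (1 << m)
-- ===== Notes on version B (the rewrite author's own statement) =====
-- stated objective: alternative
-- what changed: B replaces A's build-a-count-table-then-double loop by an arithmetic algorithm: one pass over nums extracts the set of exponents e with nums[i] = original*2^e (divisibility + power-of-two test), then returns original * 2^mex of that exponent set; no membership test on the doubled value is ever performed.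
import Mathlib
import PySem

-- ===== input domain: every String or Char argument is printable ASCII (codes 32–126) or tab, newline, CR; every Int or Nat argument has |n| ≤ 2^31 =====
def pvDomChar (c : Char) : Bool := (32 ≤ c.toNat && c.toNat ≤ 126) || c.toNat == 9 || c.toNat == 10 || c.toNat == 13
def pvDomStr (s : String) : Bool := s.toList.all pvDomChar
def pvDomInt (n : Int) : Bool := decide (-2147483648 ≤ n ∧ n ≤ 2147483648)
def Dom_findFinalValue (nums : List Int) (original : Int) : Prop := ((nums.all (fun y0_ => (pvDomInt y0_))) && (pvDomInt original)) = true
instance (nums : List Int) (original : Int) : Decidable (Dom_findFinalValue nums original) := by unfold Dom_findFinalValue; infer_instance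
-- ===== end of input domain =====

-- B replaces A's count-table + doubling loop by an arithmetic algorithm: one pass extracts
-- the exponents e with original*2^e ∈ nums, then returns original * 2^mex; objective: alternative.

-- ===== PORT A =====
-- A's counting-dict build loop
def buildHash (nums : List Int) : PySem.Dict Int Int :=
  nums.foldl
    (fun d elem =>
      if d.contains elem then d.modify elem 0 (· + 1) else d.insert elem 1)
    PySem.Dict.empty

-- A's `while not isCalculationComplete` loop; the fuel `nums.length + 1` only makes the
-- recursion total (inside Pre_ the loop exits before fuel runs out, since the successive
-- distinct values original*2^i must all occur in nums)
def loopA (d : PySem.Dict Int Int) : Int → Nat → Int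
  | original, 0 => original
  | original, n + 1 =>
      if d.contains original then loopA d (original * 2) n else original

def findFinalValue (nums : List Int) (original : Int) : Int :=
  loopA (buildHash nums) original (nums.length + 1)

-- ===== PORT B =====
-- B's `for x in nums` pass building the exponent set; `q == 1 << (q.bit_length()-1)` is
-- ported as `q = 2 ^ (PySem.Int.bitLength q - 1)` and `q.bit_length() - 1` as
-- `PySem.Int.bitLength q - 1` (exact: PySem.Int.bitLength is Python's int.bit_length)
def buildExps (nums : List Int) (original : Int) : PySem.Set Nat :=
  nums.foldl
    (fun s x =>
      if PySem.Int.mod x original = 0 then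
        let q := PySem.Int.floordiv x original
        if 0 < q ∧ q = 2 ^ (PySem.Int.bitLength q - 1) then
          s.add (PySem.Int.bitLength q - 1)
        else s
      else s)
    PySem.Set.empty

-- B's `while m in exps: m += 1`; fuel `nums.length + 1` only makes it total (the set holds
-- at most nums.length exponents, so the mex is reached within the fuel on every input)
def mexLoop (exps : PySem.Set Nat) : Nat → Nat → Nat
  | m, 0 => m
  | m, fuel + 1 => if m ∈ exps then mexLoop exps (m + 1) fuel else m

def findFinalValue_alt (nums : List Int) (original : Int) : Int :=
  if original = 0 then original
  else
    let exps := buildExps nums original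
    let m := mexLoop exps 0 (nums.length + 1)
    original * 2 ^ m

-- ===== PRECONDITION & SPEC =====
-- Pre_ excludes original = 0 with 0 ∈ nums: there the Python A loops forever (0*2 = 0).
def Pre_findFinalValue (nums : List Int) (original : Int) : Prop :=
  ¬ (original = 0 ∧ (0 : Int) ∈ nums)
instance (nums : List Int) (original : Int) : Decidable (Pre_findFinalValue nums original) := by
  unfold Pre_findFinalValue; infer_instance

def pvWitness_findFinalValue : List Int × Int := ([2, 4, 9, 8], 2)

def Spec_findFinalValue (nums : List Int) (original : Int) (out : Int) : Prop := out = findFinalValue_alt nums original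
instance (nums : List Int) (original : Int) (out : Int) : Decidable (Spec_findFinalValue nums original out) := by unfold Spec_findFinalValue; infer_instance

-- ===== CLAIM (what is proved, stated in full; the proofs are below) =====
def Claim_equal_findFinalValue : Prop := ∀ (nums : List Int) (original : Int), Dom_findFinalValue nums original → Pre_findFinalValue nums original → Spec_findFinalValue nums original (findFinalValue nums original)

-- ===== LEMMAS AND PROOFS =====

-- membership in A's hash equals membership in the list
theorem contains_buildHash_aux (nums : List Int) (d : PySem.Dict Int Int) (x : Int) :
    (nums.foldl
      (fun d elem =>
        if d.contains elem then d.modify elem 0 (· + 1) else d.insert elem 1)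
      d).contains x = (d.contains x || decide (x ∈ nums)) := by
  induction nums generalizing d with
  | nil => simp
  | cons a l ih =>
      simp only [List.foldl_cons, ih]
      by_cases hx : x = a
      · subst hx
        by_cases h : d.contains x = true <;>
          simp [h, PySem.Dict.contains_modify, List.mem_cons]
      · have hba : (x == a) = false := beq_eq_false_iff_ne.mpr hx
        by_cases h : d.contains a = true <;>
          simp [h, PySem.Dict.contains_modify, PySem.Dict.contains_insert, List.mem_cons, hx, hba]

theorem contains_buildHash (nums : List Int) (x : Int) :
    (buildHash nums).contains x = decide (x ∈ nums) := by
  unfold buildHash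
  rw [contains_buildHash_aux]
  simp

-- Python's bit_length of 2^e is e+1
theorem bitLength_two_pow (e : Nat) : PySem.Int.bitLength ((2 : Int) ^ e) = e + 1 := by
  have hne : ((2 : Int) ^ e) ≠ 0 := by positivity
  have hna : ((2 : Int) ^ e).natAbs = 2 ^ e := by
    rw [Int.natAbs_pow]; rfl
  have h1 := PySem.Int.lt_two_pow_bitLength ((2 : Int) ^ e)
  have h2 := PySem.Int.two_pow_bitLength_le ((2 : Int) ^ e) hne
  rw [hna] at h1 h2
  have he : e < PySem.Int.bitLength ((2 : Int) ^ e) :=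
    (Nat.pow_lt_pow_iff_right (by norm_num)).mp h1
  have hle : PySem.Int.bitLength ((2 : Int) ^ e) - 1 ≤ e :=
    (Nat.pow_le_pow_iff_right (by norm_num)).mp h2
  omega

-- a value of the chain passes B's per-element test and yields exactly its exponent
theorem test_of_chain (original x : Int) (h0 : original ≠ 0) (e : Nat)
    (hx : x = original * 2 ^ e) :
    PySem.Int.mod x original = 0 ∧
      PySem.Int.floordiv x original = 2 ^ e ∧
      PySem.Int.bitLength (PySem.Int.floordiv x original) - 1 = e := by
  have hdvd : original ∣ x := ⟨2 ^ e, hx⟩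
  have hq : PySem.Int.floordiv x original = 2 ^ e := by
    show x.fdiv original = 2 ^ e
    rw [hx]; exact Int.mul_fdiv_cancel_left _ h0
  exact ⟨(PySem.Int.mod_eq_zero_iff_dvd x original).mpr hdvd, hq,
    by rw [hq, bitLength_two_pow]; omega⟩

-- unfolding B's set-building fold
theorem mem_buildExps_aux (original : Int) (l : List Int) (e : Nat) :
    ∀ s : PySem.Set Nat,
      (e ∈ l.foldl
        (fun s x =>
          if PySem.Int.mod x original = 0 then
            let q := PySem.Int.floordiv x original
            if 0 < q ∧ q = 2 ^ (PySem.Int.bitLength q - 1) then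
              s.add (PySem.Int.bitLength q - 1)
            else s
          else s) s
      ↔ e ∈ s ∨ ∃ x ∈ l, PySem.Int.mod x original = 0 ∧
          0 < PySem.Int.floordiv x original ∧
          PySem.Int.floordiv x original
            = 2 ^ (PySem.Int.bitLength (PySem.Int.floordiv x original) - 1) ∧
          PySem.Int.bitLength (PySem.Int.floordiv x original) - 1 = e) := by
  induction l with
  | nil => simp
  | cons a t ih =>
      intro s
      simp only [List.foldl_cons]
      by_cases h1 : PySem.Int.mod a original = 0
      · by_cases h2 : 0 < PySem.Int.floordiv a original ∧
            PySem.Int.floordiv a original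
              = 2 ^ (PySem.Int.bitLength (PySem.Int.floordiv a original) - 1)
        · rw [if_pos h1]
          show (e ∈ t.foldl _ (if 0 < PySem.Int.floordiv a original ∧ _ then _ else s)) ↔ _
          rw [if_pos h2, ih]
          rw [PySem.Set.mem_add]
          constructor
          · rintro ((hs | he) | hex)
            · exact Or.inl hs
            · exact Or.inr ⟨a, List.mem_cons_self, h1, h2.1, h2.2, he.symm⟩
            · exact Or.inr (by rcases hex with ⟨x, hx, hrest⟩; exact ⟨x, List.mem_cons_of_mem a hx, hrest⟩)
          · rintro (hs | ⟨x, hx, hrest⟩)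
            · exact Or.inl (Or.inl hs)
            · rcases List.mem_cons.mp hx with rfl | hxt
              · exact Or.inl (Or.inr hrest.2.2.2.symm)
              · exact Or.inr ⟨x, hxt, hrest⟩
        · rw [if_pos h1]
          show (e ∈ t.foldl _ (if 0 < PySem.Int.floordiv a original ∧ _ then _ else s)) ↔ _
          rw [if_neg h2, ih]
          constructor
          · rintro (hs | ⟨x, hx, hrest⟩)
            · exact Or.inl hs
            · exact Or.inr ⟨x, List.mem_cons_of_mem a hx, hrest⟩
          · rintro (hs | ⟨x, hx, hrest⟩)
            · exact Or.inl hs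
            · rcases List.mem_cons.mp hx with rfl | hxt
              · exact absurd ⟨hrest.2.1, hrest.2.2.1⟩ h2
              · exact Or.inr ⟨x, hxt, hrest⟩
      · rw [if_neg h1, ih]
        constructor
        · rintro (hs | ⟨x, hx, hrest⟩)
          · exact Or.inl hs
          · exact Or.inr ⟨x, List.mem_cons_of_mem a hx, hrest⟩
        · rintro (hs | ⟨x, hx, hrest⟩)
          · exact Or.inl hs
          · rcases List.mem_cons.mp hx with rfl | hxt
            · exact absurd hrest.1 h1
            · exact Or.inr ⟨x, hxt, hrest⟩

-- membership in B's exponent set is membership of original*2^e in nums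
theorem mem_buildExps (nums : List Int) (original : Int) (h0 : original ≠ 0) (e : Nat) :
    e ∈ buildExps nums original ↔ original * 2 ^ e ∈ nums := by
  unfold buildExps
  rw [mem_buildExps_aux original nums e PySem.Set.empty]
  constructor
  · rintro (hs | ⟨x, hx, hmod, hpos, hpow, hexp⟩)
    · simp [PySem.Set.empty] at hs
    · obtain ⟨c, hc⟩ := (PySem.Int.mod_eq_zero_iff_dvd x original).mp hmod
      have hq : PySem.Int.floordiv x original = c := by
        show x.fdiv original = c
        rw [hc]; exact Int.mul_fdiv_cancel_left _ h0
      have hxval : x = original * 2 ^ e := by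
        rw [hc, ← hq, hpow, hexp]
      rwa [hxval] at hx
  · intro hmem
    obtain ⟨hmod, hq, hexp⟩ := test_of_chain original (original * 2 ^ e) h0 e rfl
    exact Or.inr ⟨original * 2 ^ e, hmem, hmod, by rw [hq]; positivity,
      by rw [hq, bitLength_two_pow]; norm_num, hexp⟩

-- if all of original, 2·original, …, original·2^(m-1) occur in nums then m ≤ |nums|
theorem chain_bound (nums : List Int) (original : Int) (h0 : original ≠ 0) (m : Nat)
    (h : ∀ i < m, original * 2 ^ i ∈ nums) : m ≤ nums.length := by
  classical
  have hinj : ∀ i ∈ Finset.range m, ∀ j ∈ Finset.range m,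
      original * 2 ^ i = original * 2 ^ j → i = j := by
    intro i _ j _ hij
    have h2 : (2 : Int) ^ i = 2 ^ j := mul_left_cancel₀ h0 hij
    have h2n : (2 : Nat) ^ i = 2 ^ j := by exact_mod_cast h2
    exact Nat.pow_right_injective (by norm_num) h2n
  calc m = (Finset.range m).card := (Finset.card_range m).symm
    _ ≤ nums.toFinset.card := by
          apply Finset.card_le_card_of_injOn (fun i => original * 2 ^ i)
          · intro i hi
            exact List.mem_toFinset.mpr (h i (Finset.mem_range.mp hi))
          · intro i hi j hj hij
            exact hinj i hi j hj hij
    _ ≤ nums.length := List.toFinset_card_le nums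

-- A's loop runs exactly to the first absent chain value
theorem loopA_run (nums : List Int) (k : Nat) :
    ∀ (original : Int) (fuel : Nat),
      (∀ i < k, original * 2 ^ i ∈ nums) → original * 2 ^ k ∉ nums → k < fuel →
      loopA (buildHash nums) original fuel = original * 2 ^ k := by
  induction k with
  | zero =>
      intro original fuel _ hout hfuel
      obtain ⟨f, rfl⟩ : ∃ f, fuel = f + 1 := ⟨fuel - 1, by omega⟩
      have : original ∉ nums := by simpa using hout
      simp [loopA, contains_buildHash, this]
  | succ k ih =>
      intro original fuel hin hout hfuel
      obtain ⟨f, rfl⟩ : ∃ f, fuel = f + 1 := ⟨fuel - 1, by omega⟩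
      have h0 : original ∈ nums := by simpa using hin 0 (Nat.succ_pos k)
      have step : loopA (buildHash nums) original (f + 1)
          = loopA (buildHash nums) (original * 2) f := by
        simp [loopA, contains_buildHash, h0]
      rw [step, ih (original * 2) f
        (fun i hi => by
          have := hin (i + 1) (by omega)
          rwa [pow_succ, show original * (2 ^ i * 2) = original * 2 * 2 ^ i by ring] at this)
        (by
          have := hout
          rwa [pow_succ, show original * (2 ^ k * 2) = original * 2 * 2 ^ k by ring] at this)
        (by omega)]
      ring

-- B's mex loop runs exactly to the first absent exponent
theorem mexLoop_run (exps : PySem.Set Nat) (k : Nat) :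
    ∀ (m fuel : Nat),
      (∀ i < k, (m + i) ∈ exps) → (m + k) ∉ exps → k < fuel →
      mexLoop exps m fuel = m + k := by
  induction k with
  | zero =>
      intro m fuel _ hout hfuel
      obtain ⟨f, rfl⟩ : ∃ f, fuel = f + 1 := ⟨fuel - 1, by omega⟩
      simp only [mexLoop]
      rw [if_neg (by simpa using hout)]
      omega
  | succ k ih =>
      intro m fuel hin hout hfuel
      obtain ⟨f, rfl⟩ : ∃ f, fuel = f + 1 := ⟨fuel - 1, by omega⟩
      simp only [mexLoop]
      rw [if_pos (by simpa using hin 0 (Nat.succ_pos k))]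
      rw [ih (m + 1) f (fun i hi => by
            have := hin (i + 1) (by omega)
            rwa [show m + (i + 1) = m + 1 + i by omega] at this)
          (by rwa [show m + 1 + k = m + (k + 1) by omega])
          (by omega)]
      omega


-- ===== VERDICT (by name: the statement is the Claim_ definition above) =====
theorem findFinalValue_spec : Claim_equal_findFinalValue := by
  intro nums original _ hpre
  unfold Spec_findFinalValue findFinalValue findFinalValue_alt
  by_cases h0 : original = 0
  · subst h0
    have h0n : (0 : Int) ∉ nums := fun h => hpre ⟨rfl, h⟩
    simp [loopA, contains_buildHash, h0n]
  · rw [if_neg h0]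
    show loopA (buildHash nums) original (nums.length + 1)
      = original * 2 ^ (mexLoop (buildExps nums original) 0 (nums.length + 1))
    have hex : ∃ k, original * 2 ^ k ∉ nums := by
      by_contra hc
      push Not at hc
      have := chain_bound nums original h0 (nums.length + 1) (fun i _ => hc i)
      omega
    classical
    have hN : original * 2 ^ (Nat.find hex) ∉ nums := Nat.find_spec hex
    have hlt : ∀ i < Nat.find hex, original * 2 ^ i ∈ nums := by
      intro i hi
      by_contra h
      exact Nat.find_min hex hi h
    have hbound : Nat.find hex ≤ nums.length := chain_bound nums original h0 _ hlt
    rw [loopA_run nums (Nat.find hex) original (nums.length + 1) hlt hN (by omega)]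
    rw [mexLoop_run (buildExps nums original) (Nat.find hex) 0 (nums.length + 1)
      (fun i hi => by
        rw [Nat.zero_add]
        exact (mem_buildExps nums original h0 i).mpr (hlt i hi))
      (by
        rw [Nat.zero_add]
        exact fun hmem => hN ((mem_buildExps nums original h0 _).mp hmem))
      (by omega)]
    rw [Nat.zero_add]
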